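-- pv_equiv track=rewrite | github.com/danielstarodubtsev/Python-3-QR-code-creator | QR code creator (stable 1.1.0).py | fill_data_until_required_length
-- ===== SOURCE A (Python) =====
-- def fill_data_until_required_length(data, max_bits):
--     '''
--     Fills the data with zeros until its length is a multiple of 8
--     Then fills with alternating bytes 11101100 and 00010001 until length max_bits is reached
--     '''
--
--     need_zeros = (8 - (len(data) % 8)) % 8
--
--     data += '0' * need_zeros
--
--     counter = 0
--     while len(data) < max_bits:
--         if counter % 2 == 0:
--             data += '11101100'
--         else:
--             data += '00010001'
--         counter += 1
--
--     return data
-- ===== SOURCE B (Python) =====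
-- def fill_data_until_required_length(data, max_bits):
--     '''
--     Fills the data with zeros until its length is a multiple of 8
--     Then fills with alternating bytes 11101100 and 00010001 until length max_bits is reached
--     '''
--     padded = data + '0' * (-len(data) % 8)
--     n = max(0, -((len(padded) - max_bits) // 8))  # ceil((max_bits - len(padded)) / 8)
--     return padded + ('1110110000010001' * ((n + 1) // 2))[:8 * n]
-- ===== Notes on version B (the rewrite author's own statement) =====
-- stated objective: simpler
-- what changed: Replaced the while loop appending one filler byte per iteration with a closed-form ceiling-division count of filler bytes and a single string multiplication/slice of the two-byte pattern.
import Mathlib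
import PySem

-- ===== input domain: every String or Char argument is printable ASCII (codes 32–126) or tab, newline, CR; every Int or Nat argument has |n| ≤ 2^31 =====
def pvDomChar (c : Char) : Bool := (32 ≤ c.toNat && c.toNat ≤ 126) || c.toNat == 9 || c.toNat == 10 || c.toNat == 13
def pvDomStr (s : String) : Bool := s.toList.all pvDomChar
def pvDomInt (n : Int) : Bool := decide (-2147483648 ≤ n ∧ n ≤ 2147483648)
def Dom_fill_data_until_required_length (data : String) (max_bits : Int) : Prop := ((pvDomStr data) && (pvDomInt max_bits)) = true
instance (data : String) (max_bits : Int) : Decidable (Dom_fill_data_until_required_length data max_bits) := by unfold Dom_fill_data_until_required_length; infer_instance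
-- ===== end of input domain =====

-- B replaces A's byte-appending while loop by a closed-form ceiling-division count of
-- filler bytes and one slice of the repeated two-byte pattern (objective: simpler).

-- ===== PORT A =====
-- '11101100' and '00010001' as explicit char lists (String.toList is opaque to the kernel)
def pvBytesEC : List Char := ['1','1','1','0','1','1','0','0']
def pvBytesRep : List Char := ['0','0','0','1','0','0','0','1']
-- termination measure lemma for the while loop (cited by name in decreasing_by)
theorem pvFillLoop_dec (d : List Char) (m c : Int) (h : (d.length : Int) < m) :
    (m - ((d ++ (if PySem.Int.mod c 2 = 0 then pvBytesEC else pvBytesRep)).length : Int)).toNat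
      < (m - (d.length : Int)).toNat := by
  simp only [List.length_append]
  split <;> simp [pvBytesEC, pvBytesRep] <;> omega

-- the while loop: appends one 8-char filler byte per iteration while len(data) < max_bits
def pvFillLoop (data : List Char) (max_bits : Int) (counter : Int) : List Char :=
  if h : (data.length : Int) < max_bits then
    pvFillLoop
      (data ++ (if PySem.Int.mod counter 2 = 0 then pvBytesEC else pvBytesRep))
      max_bits (counter + 1)
  else data
termination_by (max_bits - data.length).toNat
decreasing_by exact pvFillLoop_dec data max_bits counter h

def fill_data_until_required_length (data : String) (max_bits : Int) : String :=
  let need_zeros := PySem.Int.mod (8 - PySem.Int.mod (PySem.Str.len data) 8) 8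
  -- data += '0' * need_zeros  (need_zeros ≥ 0)
  let data' := data.toList ++ List.replicate need_zeros.toNat '0'
  String.ofList (pvFillLoop data' max_bits 0)

-- ===== PORT B =====
-- '1110110000010001' * k
def pvRepeat (xs : List Char) : Nat → List Char
  | 0 => []
  | k + 1 => xs ++ pvRepeat xs k

def fill_data_until_required_length_alt (data : String) (max_bits : Int) : String :=
  let padded := data.toList ++ List.replicate (PySem.Int.mod (-(PySem.Str.len data)) 8).toNat '0'
  let n := max 0 (-(PySem.Int.floordiv ((padded.length : Int) - max_bits) 8))
  String.ofList (padded ++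
    PySem.List.slice (pvRepeat (pvBytesEC ++ pvBytesRep) (PySem.Int.floordiv (n + 1) 2).toNat)
      none (some (8 * n)))

-- ===== PRECONDITION & SPEC =====
def Spec_fill_data_until_required_length (data : String) (max_bits : Int) (out : String) : Prop := out = fill_data_until_required_length_alt data max_bits
instance (data : String) (max_bits : Int) (out : String) : Decidable (Spec_fill_data_until_required_length data max_bits out) := by unfold Spec_fill_data_until_required_length; infer_instance

-- ===== CLAIM (what is proved, stated in full; the proofs are below) =====
def Claim_equal_fill_data_until_required_length : Prop := ∀ (data : String) (max_bits : Int), Dom_fill_data_until_required_length data max_bits → Spec_fill_data_until_required_length data max_bits (fill_data_until_required_length data max_bits)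

-- ===== LEMMAS AND PROOFS =====

-- the byte appended at a given counter value
def pvByte (c : Int) : List Char :=
  if PySem.Int.mod c 2 = 0 then pvBytesEC else pvBytesRep

-- the n bytes the loop appends starting from counter c
def pvAlt (c : Int) (n : Nat) : List Char :=
  match n with
  | 0 => []
  | n + 1 => pvByte c ++ pvAlt (c + 1) n

theorem pvByte_length (c : Int) : (pvByte c).length = 8 := by
  unfold pvByte; split <;> decide

theorem pvByte_shift (c : Int) : pvByte (c + 2) = pvByte c := by
  unfold pvByte
  have : PySem.Int.mod (c + 2) 2 = PySem.Int.mod c 2 := by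
    rw [PySem.Int.mod_eq_emod_of_pos (by omega), PySem.Int.mod_eq_emod_of_pos (by omega)]
    omega
  rw [this]

theorem pvAlt_shift (n : Nat) : ∀ c : Int, pvAlt (c + 2) n = pvAlt c n := by
  induction n with
  | zero => intro c; rfl
  | succ n ih =>
    intro c
    show pvByte (c + 2) ++ pvAlt (c + 2 + 1) n = pvByte c ++ pvAlt (c + 1) n
    rw [pvByte_shift]
    have : c + 2 + 1 = (c + 1) + 2 := by ring
    rw [this, ih]

theorem pvFillLoop_eq (m : Int) : ∀ (n : Nat) (d : List Char) (c : Int),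
    ((m - d.length + 7) / 8).toNat = n → pvFillLoop d m c = d ++ pvAlt c n := by
  intro n
  induction n with
  | zero =>
    intro d c h
    rw [pvFillLoop]
    have hnl : ¬ ((d.length : Int) < m) := by omega
    simp [hnl, pvAlt]
  | succ n ih =>
    intro d c h
    rw [pvFillLoop]
    have hlt : (d.length : Int) < m := by omega
    simp only [hlt]
    have hb : (if PySem.Int.mod c 2 = 0 then pvBytesEC else pvBytesRep) = pvByte c := rfl
    rw [hb]
    have hlen : ((d ++ pvByte c).length : Int) = d.length + 8 := by
      simp [List.length_append, pvByte_length]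
    rw [ih (d ++ pvByte c) (c + 1) (by rw [hlen]; omega)]
    show (d ++ pvByte c) ++ pvAlt (c + 1) n = d ++ (pvByte c ++ pvAlt (c + 1) n)
    simp [List.append_assoc]

-- taking 8*n chars of the repeated 16-char pattern gives the n alternating bytes
theorem pvTake_repeat : ∀ (k n : Nat), n ≤ 2 * k →
    (pvRepeat (pvBytesEC ++ pvBytesRep) k).take (8 * n) = pvAlt 0 n := by
  intro k
  induction k with
  | zero =>
    intro n hn
    interval_cases n
    rfl
  | succ k ih =>
    intro n hn
    match n with
    | 0 => rfl
    | 1 =>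
      show (((pvBytesEC ++ pvBytesRep)) ++ pvRepeat _ k).take 8 = pvByte 0 ++ pvAlt 1 0
      simp [pvByte, pvAlt, PySem.Int.mod, pvBytesEC, pvBytesRep]
    | n + 2 =>
      show (((pvBytesEC ++ pvBytesRep)) ++ pvRepeat _ k).take (8 * (n + 2)) = pvAlt 0 (n + 2)
      have h16 : ((pvBytesEC ++ pvBytesRep)).length = 16 := by decide
      have h8 : 8 * (n + 2) = ((pvBytesEC ++ pvBytesRep)).length + 8 * n := by
        rw [h16]; omega
      rw [h8, List.take_append]
      have hred : (pvBytesEC ++ pvBytesRep).length + 8 * n - (pvBytesEC ++ pvBytesRep).length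
          = 8 * n := by omega
      rw [hred, List.take_of_length_le (by omega), ih n (by omega)]
      show _ = pvByte 0 ++ (pvByte 1 ++ pvAlt 2 n)
      have h2 : pvAlt 2 n = pvAlt 0 n := by
        have := pvAlt_shift n 0
        simpa using this
      rw [h2]
      have hA : pvByte 0 = pvBytesEC := by decide
      have hB : pvByte 1 = pvBytesRep := by decide
      rw [hA, hB, List.append_assoc]

-- ===== VERDICT (by name: the statement is the Claim_ definition above) =====
theorem fill_data_until_required_length_spec : Claim_equal_fill_data_until_required_length := by
  intro data m _
  unfold Spec_fill_data_until_required_length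
  unfold fill_data_until_required_length fill_data_until_required_length_alt
  simp only [PySem.Str.len_eq]
  set l := data.toList with hl
  set L : Int := (l.length : Int) with hL
  have hz : PySem.Int.mod (8 - PySem.Int.mod L 8) 8 = PySem.Int.mod (-L) 8 := by
    rw [PySem.Int.mod_eq_emod_of_pos (show (0:Int) < 8 by omega),
        PySem.Int.mod_eq_emod_of_pos (show (0:Int) < 8 by omega),
        PySem.Int.mod_eq_emod_of_pos (show (0:Int) < 8 by omega)]
    omega
  rw [hz]
  set padded := l ++ List.replicate (PySem.Int.mod (-L) 8).toNat '0' with hpad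
  set Lp : Int := (padded.length : Int) with hLp
  set nA : Nat := ((m - Lp + 7) / 8).toNat with hnA
  have hfd : PySem.Int.floordiv (Lp - m) 8 = (Lp - m) / 8 :=
    PySem.Int.floordiv_eq_ediv_of_pos (by omega)
  have hn : max 0 (-(PySem.Int.floordiv (Lp - m) 8)) = (nA : Int) := by
    rw [hfd, hnA]; omega
  rw [hn]
  have hfd2 : PySem.Int.floordiv ((nA : Int) + 1) 2 = ((nA : Int) + 1) / 2 :=
    PySem.Int.floordiv_eq_ediv_of_pos (by omega)
  have hslice : PySem.List.slice
      (pvRepeat (pvBytesEC ++ pvBytesRep) (PySem.Int.floordiv ((nA : Int) + 1) 2).toNat)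
      none (some (8 * (nA : Int)))
      = (pvRepeat (pvBytesEC ++ pvBytesRep) (PySem.Int.floordiv ((nA : Int) + 1) 2).toNat).take
        ((8 * (nA : Int)).toNat) := by
    exact PySem.List.slice_to _ (by positivity)
  rw [hslice]
  have h8 : ((8 * (nA : Int)).toNat) = 8 * nA := by omega
  rw [h8]
  have hle : nA ≤ 2 * (PySem.Int.floordiv ((nA : Int) + 1) 2).toNat := by
    rw [hfd2]; omega
  rw [pvTake_repeat _ nA hle]
  rw [pvFillLoop_eq m nA padded 0 rfl]
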